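-- pv_equiv track=rewrite | github.com/DTDevelop/ProjectEuler | Problems11-20/Problem11.py | greatest_product_of_diag
-- ===== SOURCE A (Python) =====
-- def greatest_product_of_diag(matrix, adjacent):
--     """
--     given matrix and number of adjacent
--     return greatest product of diagonal
--     """
--     greatest_product = 0
--
--     matrix_length = len(matrix)
--
--     for col in range(matrix_length):
--         for num in range(matrix_length): # relative number to compare
--             if num + adjacent > matrix_length: # not enough values in direction to compare
--                 break # move to next row
--             if col + adjacent > matrix_length: # not enough remaining diagonals to compare
--                 return greatest_product # end
--             new_product = 1
--             for inc in range(adjacent): # calculating product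
--                 new_product *= matrix[col+inc][num+inc]
--             if new_product > greatest_product:
--                 greatest_product = new_product
--     return greatest_product
-- ===== SOURCE B (Python) =====
-- def _max_window_product(d, k):
--     # max product over all k-length windows of d (len(d) >= k >= 1),
--     # maintained by a sliding window: product of the nonzero entries + a zero count
--     prod = 1
--     zeros = 0
--     for x in d[:k]:
--         if x == 0:
--             zeros += 1
--         else:
--             prod *= x
--     best = 0 if zeros else prod
--     for i in range(k, len(d)):
--         x = d[i]
--         y = d[i - k]
--         if x == 0:
--             zeros += 1
--         else:
--             prod *= x
--         if y == 0:
--             zeros -= 1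
--         else:
--             prod //= y
--         v = 0 if zeros else prod
--         if v > best:
--             best = v
--     return best
--
--
-- def greatest_product_of_diag(matrix, adjacent):
--     n = len(matrix)
--     if adjacent <= 0:
--         return 1 if n > 0 else 0
--     if adjacent > n:
--         return 0
--     best = 0
--     for s in range(-(n - adjacent), n - adjacent + 1):
--         diag = [matrix[i][i + s] for i in range(max(0, -s), n - max(0, s))]
--         best = max(best, _max_window_product(diag, adjacent))
--     return best
-- ===== Notes on version B (the rewrite author's own statement) =====
-- stated objective: alternative
-- what changed: A recomputes each k-cell product from scratch for every (col,num) position; B walks each down-right diagonal once, maintaining a sliding-window product of the nonzero entries plus a zero count (dividing out the expelled entry), so each window value is produced incrementally rather than by an inner product loop.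
import Mathlib
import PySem

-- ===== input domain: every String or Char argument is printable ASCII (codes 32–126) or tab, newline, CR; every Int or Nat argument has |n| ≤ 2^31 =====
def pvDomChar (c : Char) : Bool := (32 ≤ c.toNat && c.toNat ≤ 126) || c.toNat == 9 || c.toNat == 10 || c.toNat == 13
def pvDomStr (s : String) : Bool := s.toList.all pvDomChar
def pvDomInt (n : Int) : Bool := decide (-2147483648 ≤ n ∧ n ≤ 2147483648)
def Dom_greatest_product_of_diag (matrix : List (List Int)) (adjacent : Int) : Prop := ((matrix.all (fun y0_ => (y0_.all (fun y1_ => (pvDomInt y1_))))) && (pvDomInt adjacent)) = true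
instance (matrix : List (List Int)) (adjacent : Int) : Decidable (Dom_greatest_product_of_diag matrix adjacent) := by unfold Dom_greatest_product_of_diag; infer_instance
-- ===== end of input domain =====

-- B replaces A's per-window re-multiplication by a sliding-window product along each diagonal
-- (a zero count plus the product of the nonzero entries); the return values are proved equal
-- on every input Pre_ admits (exactly the inputs where A does not raise IndexError).

-- ===== PORT A =====

-- matrix[i][j] (under Pre_ every access A performs is in range)
def pvCell (matrix : List (List Int)) (i j : Int) : Int :=
  PySem.List.pyGetD (PySem.List.pyGetD matrix i []) j 0

-- the innermost 'for inc in range(adjacent): new_product *= matrix[col+inc][num+inc]'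
def pvProdA (matrix : List (List Int)) (adjacent col num : Int) : Int :=
  (PySem.List.pyRange 0 adjacent 1).foldl (fun p inc => p * pvCell matrix (col + inc) (num + inc)) 1

-- 'for num in range(matrix_length)': .inl g = the 'return greatest_product' branch, .inr g = loop ended/broke
def pvInnerA (matrix : List (List Int)) (n adjacent col : Int) : List Int → Int → Sum Int Int
  | [], g => .inr g
  | num :: rest, g =>
    if num + adjacent > n then .inr g
    else if col + adjacent > n then .inl g
    else
      let p := pvProdA matrix adjacent col num
      pvInnerA matrix n adjacent col rest (if p > g then p else g)

-- 'for col in range(matrix_length)'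
def pvOuterA (matrix : List (List Int)) (n adjacent : Int) : List Int → Int → Int
  | [], g => g
  | col :: rest, g =>
    match pvInnerA matrix n adjacent col (PySem.List.pyRange 0 n 1) g with
    | .inl g' => g'
    | .inr g' => pvOuterA matrix n adjacent rest g'

def greatest_product_of_diag (matrix : List (List Int)) (adjacent : Int) : Int :=
  let n : Int := matrix.length
  pvOuterA matrix n adjacent (PySem.List.pyRange 0 n 1) 0

-- ===== PORT B =====

-- first loop of _max_window_product: product of nonzeros / zero count of d[:k]
def pvInitPZ (w : List Int) : Int × Int :=
  w.foldl (fun pz x => if x = 0 then (pz.1, pz.2 + 1) else (pz.1 * x, pz.2)) (1, 0)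

-- body of 'for i in range(k, len(d))'
def pvSlide (d : List Int) (k : Int) (st : Int × Int × Int) (i : Int) : Int × Int × Int :=
  let x := PySem.List.pyGetD d i 0
  let y := PySem.List.pyGetD d (i - k) 0
  let p1 := if x = 0 then st.1 else st.1 * x
  let z1 := if x = 0 then st.2.1 + 1 else st.2.1
  let p2 := if y = 0 then p1 else PySem.Int.floordiv p1 y
  let z2 := if y = 0 then z1 - 1 else z1
  let v := if z2 ≠ 0 then 0 else p2
  (p2, z2, if v > st.2.2 then v else st.2.2)

def pvMaxWindowProd (d : List Int) (k : Int) : Int :=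
  let pz := pvInitPZ (PySem.List.slice d none (some k))
  let best0 := if pz.2 ≠ 0 then 0 else pz.1
  ((PySem.List.pyRange k d.length 1).foldl (pvSlide d k) (pz.1, pz.2, best0)).2.2

-- '[matrix[i][i+s] for i in range(max(0,-s), n - max(0,s))]'
def pvDiag (matrix : List (List Int)) (n s : Int) : List Int :=
  (PySem.List.pyRange (max 0 (-s)) (n - max 0 s) 1).map
    (fun i => PySem.List.pyGetD (PySem.List.pyGetD matrix i []) (i + s) 0)

def greatest_product_of_diag_alt (matrix : List (List Int)) (adjacent : Int) : Int :=
  let n : Int := matrix.length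
  if adjacent ≤ 0 then (if n > 0 then 1 else 0)
  else if adjacent > n then 0
  else
    (PySem.List.pyRange (-(n - adjacent)) (n - adjacent + 1) 1).foldl
      (fun best s => max best (pvMaxWindowProd (pvDiag matrix n s) adjacent)) 0

-- ===== PRECONDITION & SPEC =====
-- Pre_ excludes exactly the inputs where A raises IndexError: when 0 < adjacent ≤ n the matrix
-- must contain every cell (i,j) of the band |i-j| ≤ n-adjacent (those are exactly the cells A reads).
def Pre_greatest_product_of_diag (matrix : List (List Int)) (adjacent : Int) : Prop :=
  0 < adjacent → adjacent ≤ (matrix.length : Int) →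
    ∀ i < matrix.length, ∀ j < matrix.length,
      ((i : Int) - (j : Int)).natAbs + adjacent.toNat ≤ matrix.length →
        j < (matrix.getD i []).length
instance (matrix : List (List Int)) (adjacent : Int) : Decidable (Pre_greatest_product_of_diag matrix adjacent) := by unfold Pre_greatest_product_of_diag; infer_instance

def pvWitness_greatest_product_of_diag : List (List Int) × Int := ([[1, 2], [3, 4]], 2)

def Spec_greatest_product_of_diag (matrix : List (List Int)) (adjacent : Int) (out : Int) : Prop := out = greatest_product_of_diag_alt matrix adjacent
instance (matrix : List (List Int)) (adjacent : Int) (out : Int) : Decidable (Spec_greatest_product_of_diag matrix adjacent out) := by unfold Spec_greatest_product_of_diag; infer_instance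

-- ===== CLAIM (what is proved, stated in full; the proofs are below) =====
def Claim_equal_greatest_product_of_diag : Prop := ∀ (matrix : List (List Int)) (adjacent : Int), Dom_greatest_product_of_diag matrix adjacent → Pre_greatest_product_of_diag matrix adjacent → Spec_greatest_product_of_diag matrix adjacent (greatest_product_of_diag matrix adjacent)

-- ===== LEMMAS AND PROOFS =====

-- spec-side cell access and window product, over Nat indices
def pvEnt (m : List (List Int)) (i j : Nat) : Int := (m.getD i []).getD j 0

def pvWP (m : List (List Int)) (kk c u : Nat) : Int :=
  ((List.range kk).map (fun t => pvEnt m (c + t) (u + t))).prod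

-- product of the nonzero entries / number of zeros of a window
def pvPNZ (w : List Int) : Int := (w.filter (fun x => x ≠ 0)).prod
def pvZC (w : List Int) : Int := (w.count 0 : Int)

lemma pvCell_nat (m : List (List Int)) (i j : Nat) : pvCell m (i : Int) (j : Int) = pvEnt m i j := by
  simp [pvCell, pvEnt, PySem.List.pyGetD_natCast]

lemma pvmax (g p : Int) : (if p > g then p else g) = max g p := by
  split <;> omega

lemma foldl_maxf_comm {α : Type} (w : α → Int) (l : List α) (bst v : Int) :
    max bst (l.foldl (fun x y => max x (w y)) v) = l.foldl (fun x y => max x (w y)) (max bst v) := by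
  induction l generalizing v with
  | nil => rfl
  | cons x l ih => simp only [List.foldl_cons]; rw [ih, max_assoc]

lemma prodA_eq (m : List (List Int)) (kk c u : Nat) :
    pvProdA m (kk : Int) (c : Int) (u : Int) = pvWP m kk c u := by
  unfold pvProdA pvWP
  rw [PySem.List.pyRange_zero_natCast, List.foldl_map, List.prod_eq_foldl, List.foldl_map]
  congr 1
  funext p t
  have : ((c : Int) + (t : Int)) = ((c + t : Nat) : Int) := by push_cast; ring
  have h2 : ((u : Int) + (t : Int)) = ((u + t : Nat) : Int) := by push_cast; ring
  rw [this, h2, pvCell_nat]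

lemma val_eq_prod (w : List Int) :
    (if pvZC w ≠ 0 then 0 else pvPNZ w) = w.prod := by
  by_cases h : (0 : Int) ∈ w
  · have hc : w.count 0 ≠ 0 := (List.count_pos_iff.2 h).ne'
    simp only [pvZC, ne_eq, Int.natCast_eq_zero, hc, not_false_eq_true, if_true]
    exact (List.prod_eq_zero h).symm
  · have hz : w.count 0 = 0 := List.count_eq_zero.2 h
    have hf : w.filter (fun x => x ≠ 0) = w := List.filter_eq_self.2 (by
      intro x hx; simp; rintro rfl; exact h hx)
    simp only [pvZC, hz, Nat.cast_zero, ne_eq, not_true_eq_false, if_neg, pvPNZ,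
      not_false_eq_true]
    simp only [ne_eq] at hf
    rw [hf]

lemma initPZ_eq (w : List Int) (p z : Int) :
    w.foldl (fun pz x => if x = 0 then (pz.1, pz.2 + 1) else (pz.1 * x, pz.2)) (p, z)
      = (p * pvPNZ w, z + pvZC w) := by
  induction w generalizing p z with
  | nil => simp [pvPNZ, pvZC]
  | cons x w ih =>
    by_cases hx : x = 0
    · subst hx
      simp only [List.foldl_cons, if_true, ih, pvPNZ, pvZC, List.count_cons, List.filter_cons]
      norm_num
      ring
    · simp only [List.foldl_cons, hx, if_false, ih, pvPNZ, pvZC, List.count_cons,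
        List.filter_cons]
      simp [hx]
      ring

lemma floordiv_mul_cancel (y r : Int) (h : y ≠ 0) : PySem.Int.floordiv (y * r) y = r := by
  have hd : PySem.Int.mod (y * r) y = 0 := (PySem.Int.mod_eq_zero_iff_dvd _ _).2 ⟨r, rfl⟩
  have h2 := PySem.Int.floordiv_mul_add_mod (y * r) y
  rw [hd, add_zero] at h2
  have h3 : (PySem.Int.floordiv (y * r) y - r) * y = 0 := by ring_nf; linarith
  rcases mul_eq_zero.1 h3 with h1 | h1
  · omega
  · exact absurd h1 h


lemma slide_finish (w' : List Int) (p2 z2 b : Int) (hp : p2 = pvPNZ w') (hz : z2 = pvZC w') :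
    ((p2, z2, if (if ¬ z2 = 0 then 0 else p2) > b then (if ¬ z2 = 0 then 0 else p2) else b) :
        Int × Int × Int)
      = (pvPNZ w', pvZC w', max b w'.prod) := by
  subst hp hz
  have hv : (if ¬ pvZC w' = 0 then (0 : Int) else pvPNZ w') = w'.prod := by
    simpa [ne_eq] using val_eq_prod w'
  rw [hv, pvmax]

-- one step of B's sliding window: consuming d[kk+T] and expelling d[T]
lemma slide_step (d : List Int) (kk T : Nat) (b : Int) (hT : kk + T < d.length) :
    pvSlide d (kk : Int) (pvPNZ ((d.drop T).take kk), pvZC ((d.drop T).take kk), b)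
        ((kk : Int) + (T : Nat)) =
      (pvPNZ ((d.drop (T + 1)).take kk), pvZC ((d.drop (T + 1)).take kk),
        max b (((d.drop (T + 1)).take kk).prod)) := by
  have hTlen : T < d.length := by omega
  have key : d[T] :: (d.drop (T + 1)).take kk = (d.drop T).take kk ++ [d[kk + T]] := by
    have h1 : d.drop T = d[T] :: d.drop (T + 1) := List.drop_eq_getElem_cons hTlen
    have h2 : kk < (d.drop T).length := by simp [List.length_drop]; omega
    calc d[T] :: (d.drop (T + 1)).take kk = (d.drop T).take (kk + 1) := by
          rw [h1, List.take_succ_cons]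
      _ = (d.drop T).take kk ++ [(d.drop T)[kk]] := List.take_succ_eq_append_getElem h2
      _ = (d.drop T).take kk ++ [d[kk + T]] := by
          rw [List.getElem_drop]
          congr 3
          omega
  -- zero-count and nonzero-product transport along `key`
  have hzc : pvZC ((d.drop T).take kk) + (if d[kk + T] = 0 then 1 else 0)
      = (if d[T] = 0 then 1 else 0) + pvZC ((d.drop (T + 1)).take kk) := by
    have hh := congrArg (fun l : List Int => (l.count 0 : Int)) key
    simp only [List.count_cons, List.count_append, List.count_nil,
      beq_iff_eq] at hh
    simp only [pvZC]
    push_cast at hh ⊢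
    by_cases h1 : d[T] = 0 <;> by_cases h2 : d[kk + T] = 0 <;>
      simp only [h1, h2, if_true, if_false, ] at hh ⊢ <;>
      omega
  have hpnz : (if d[T] = 0 then 1 else d[T]) * pvPNZ ((d.drop (T + 1)).take kk)
      = pvPNZ ((d.drop T).take kk) * (if d[kk + T] = 0 then 1 else d[kk + T]) := by
    have := congrArg (fun l => ((l.filter (fun x => x ≠ 0)).prod)) key
    simp only [List.filter_cons, List.filter_append] at this
    by_cases h1 : d[T] = 0 <;> by_cases h2 : d[kk + T] = 0 <;>
      simp [pvPNZ, h1, h2] at this ⊢ <;> rw [this]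
  -- evaluate the port's step
  have hx : PySem.List.pyGetD d ((kk : Int) + (T : Nat)) 0 = d[kk + T] := by
    have : ((kk : Int) + (T : Nat)) = ((kk + T : Nat) : Int) := by push_cast; ring
    rw [this, PySem.List.pyGetD_natCast, List.getD_eq_getElem?_getD,
      List.getElem?_eq_getElem hT]
    rfl
  have hy : PySem.List.pyGetD d ((kk : Int) + (T : Nat) - (kk : Int)) 0 = d[T] := by
    have : ((kk : Int) + (T : Nat) - (kk : Int)) = ((T : Nat) : Int) := by ring
    rw [this, PySem.List.pyGetD_natCast, List.getD_eq_getElem?_getD,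
      List.getElem?_eq_getElem hTlen]
    rfl
  unfold pvSlide
  simp only [hx, hy]
  rcases eq_or_ne (d[T]) 0 with h1 | h1 <;> rcases eq_or_ne (d[kk + T]) 0 with h2 | h2 <;>
    simp only [h1, h2, if_true, if_false, ne_eq]
  · exact slide_finish _ _ _ _ (by simpa [h1, h2] using hpnz.symm) (by simp [h1, h2] at hzc; omega)
  · exact slide_finish _ _ _ _ (by simpa [h1, h2] using hpnz.symm) (by simp [h1, h2] at hzc; omega)
  · refine slide_finish _ _ _ _ ?_ (by simp [h1, h2] at hzc; omega)
    simp only [h1, if_false, h2, if_true, mul_one] at hpnz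
    rw [← hpnz, floordiv_mul_cancel _ _ h1]
  · refine slide_finish _ _ _ _ ?_ (by simp [h1, h2] at hzc; omega)
    simp only [h1, h2, if_false] at hpnz
    rw [← hpnz, floordiv_mul_cancel _ _ h1]

-- folding B's slide over i = kk .. kk+t-1
lemma slide_fold (d : List Int) (kk : Nat) (t : Nat) (ht : kk + t ≤ d.length) :
    ((List.range t).map (fun j => ((kk : Int) + (j : Nat)))).foldl (pvSlide d (kk : Int))
        (pvPNZ (d.take kk), pvZC (d.take kk), (d.take kk).prod)
      = (pvPNZ ((d.drop t).take kk), pvZC ((d.drop t).take kk),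
          ((List.range t).map (fun j => ((d.drop (j + 1)).take kk).prod)).foldl max
            ((d.take kk).prod)) := by
  induction t with
  | zero => simp
  | succ t ih =>
    rw [List.range_succ]
    simp only [List.map_append, List.foldl_append, List.map_cons, List.map_nil,
      List.foldl_cons, List.foldl_nil]
    rw [ih (by omega)]
    exact slide_step d kk t _ (by omega)

-- B's per-diagonal routine as a fold of max over all window products
lemma mwp_eq (d : List Int) (kk : Nat) (hlen : kk ≤ d.length) :
    pvMaxWindowProd d (kk : Int)
      = ((List.range (d.length - kk)).map (fun j => ((d.drop (j + 1)).take kk).prod)).foldl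
          max ((d.take kk).prod) := by
  unfold pvMaxWindowProd
  have hsl : PySem.List.slice d none (some (kk : Int)) = d.take kk :=
    PySem.List.slice_to_natCast d kk
  rw [hsl]
  have hinit : pvInitPZ (d.take kk) = (pvPNZ (d.take kk), pvZC (d.take kk)) := by
    unfold pvInitPZ
    rw [initPZ_eq]
    simp
  rw [hinit]
  show (List.foldl (pvSlide d (kk:Int))
      (pvPNZ (d.take kk), pvZC (d.take kk),
        if pvZC (d.take kk) ≠ 0 then 0 else pvPNZ (d.take kk))
      (PySem.List.pyRange (kk:Int) (d.length : Int) 1)).2.2 = _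
  have hb0 : (if pvZC (d.take kk) ≠ 0 then (0 : Int)
      else pvPNZ (d.take kk)) = (d.take kk).prod := val_eq_prod (d.take kk)
  rw [hb0]
  have hr : PySem.List.pyRange (kk : Int) (d.length : Int) 1
      = (List.range (d.length - kk)).map (fun j => ((kk : Int) + (j : Nat))) := by
    rw [PySem.List.pyRange_one]
    have htn : ((d.length : Int) - (kk : Int)).toNat = d.length - kk := by omega
    rw [htn]
  rw [hr]
  rw [slide_fold d kk (d.length - kk) (by omega)]

-- a window of a list built from a comprehension over range
lemma window_of_map_range (g : Nat → Int) (L' j kk : Nat) (h : j + kk ≤ L') :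
    (((List.range L').map g).drop j).take kk = (List.range kk).map (fun t => g (j + t)) := by
  apply List.ext_getElem
  · simp; omega
  · intro i h1 h2
    simp [List.getElem_take, List.getElem_drop]

-- A's inner loop: a prefix of nums that all fit runs to completion, accumulating maxima
lemma innerA_run (m : List (List Int)) (n adjacent col : Int) (l1 l2 : List Int) (g : Int)
    (hcol : col + adjacent ≤ n) (h1 : ∀ x ∈ l1, x + adjacent ≤ n) :
    pvInnerA m n adjacent col (l1 ++ l2) g
      = pvInnerA m n adjacent col l2
          (l1.foldl (fun g num => max g (pvProdA m adjacent col num)) g) := by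
  induction l1 generalizing g with
  | nil => simp
  | cons num rest ih =>
    have hnum : ¬ num + adjacent > n := by have := h1 num (by simp); omega
    have hc : ¬ col + adjacent > n := by omega
    simp only [List.cons_append, pvInnerA, hnum, hc, if_false, List.foldl_cons]
    rw [pvmax]
    exact ih _ (fun x hx => h1 x (by simp [hx]))

-- A's inner loop breaks immediately on a num that does not fit
lemma innerA_stop (m : List (List Int)) (n adjacent col : Int) (l : List Int) (g : Int)
    (h : l = [] ∨ ∃ num rest, l = num :: rest ∧ num + adjacent > n) :
    pvInnerA m n adjacent col l g = .inr g := by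
  rcases h with rfl | ⟨num, rest, rfl, hnum⟩
  · rfl
  · simp [pvInnerA, hnum]

-- A's inner loop returns as soon as the col check fires
lemma innerA_ret (m : List (List Int)) (n adjacent col : Int) (num : Int) (rest : List Int)
    (g : Int) (h1 : num + adjacent ≤ n) (h2 : col + adjacent > n) :
    pvInnerA m n adjacent col (num :: rest) g = .inl g := by
  have : ¬ num + adjacent > n := by omega
  simp [pvInnerA, this, h2]

-- A's outer loop over cols whose inner loop completes
lemma outerA_run (m : List (List Int)) (n adjacent : Int) (inres : Int → Int → Int)
    (l1 l2 : List Int) (g : Int)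
    (hinner : ∀ c ∈ l1, ∀ g', pvInnerA m n adjacent c (PySem.List.pyRange 0 n 1) g'
      = .inr (inres c g')) :
    pvOuterA m n adjacent (l1 ++ l2) g
      = pvOuterA m n adjacent l2 (l1.foldl (fun g c => inres c g) g) := by
  induction l1 generalizing g with
  | nil => simp
  | cons c rest ih =>
    simp only [List.cons_append, pvOuterA, hinner c (by simp), List.foldl_cons]
    exact ih _ (fun c hc => hinner c (by simp [hc]))

-- A's outer loop stops and returns g when the inner loop signals return
lemma outerA_ret (m : List (List Int)) (n adjacent : Int) (col : Int) (rest : List Int)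
    (g : Int) (h : pvInnerA m n adjacent col (PySem.List.pyRange 0 n 1) g = .inl g) :
    pvOuterA m n adjacent (col :: rest) g = g := by
  simp [pvOuterA, h]

lemma fold_max_one (l : List Int) (g : Int) (h : l ≠ []) :
    l.foldl (fun g _ => max g 1) g = max g 1 := by
  induction l generalizing g with
  | nil => exact absurd rfl h
  | cons x rest ih =>
    rcases rest with _ | ⟨y, rest'⟩
    · simp
    · rw [List.foldl_cons, ih _ (by simp)]
      simp

lemma A_empty (m : List (List Int)) (adjacent : Int) (h : m.length = 0) :
    greatest_product_of_diag m adjacent = 0 := by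
  simp [greatest_product_of_diag, h, PySem.List.pyRange_one_eq_nil, pvOuterA]

lemma B_empty (m : List (List Int)) (adjacent : Int) (h : m.length = 0) :
    greatest_product_of_diag_alt m adjacent = 0 := by
  simp only [greatest_product_of_diag_alt, h, Nat.cast_zero]
  split_ifs <;> simp_all

lemma innerA_nonpos (m : List (List Int)) (n adjacent col : Int) (ha : adjacent ≤ 0)
    (hcol : col < n) (l : List Int) (g : Int) (hl : l ≠ []) (hmem : ∀ x ∈ l, x < n) :
    pvInnerA m n adjacent col l g = .inr (max g 1) := by
  induction l generalizing g with
  | nil => exact absurd rfl hl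
  | cons num rest ih =>
    have h1 : ¬ num + adjacent > n := by have := hmem num (by simp); omega
    have h2 : ¬ col + adjacent > n := by omega
    have hp : pvProdA m adjacent col num = 1 := by
      simp [pvProdA, PySem.List.pyRange_one_eq_nil ha]
    simp only [pvInnerA, h1, h2, if_false, hp, pvmax]
    rcases rest with _ | ⟨y, rest'⟩
    · rfl
    · rw [ih (max g 1) (by simp) (fun x hx => hmem x (by simp [hx]))]
      simp

lemma A_nonpos (m : List (List Int)) (adjacent : Int) (hn : 1 ≤ m.length)
    (ha : adjacent ≤ 0) : greatest_product_of_diag m adjacent = 1 := by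
  unfold greatest_product_of_diag
  have hn' : (0 : Int) < (m.length : Int) := by exact_mod_cast hn
  have hne : PySem.List.pyRange 0 (m.length : Int) 1 ≠ [] := by
    rw [PySem.List.pyRange_one_cons hn']; simp
  have hrun := outerA_run m (m.length : Int) adjacent (fun _ g => max g 1)
    (PySem.List.pyRange 0 (m.length : Int) 1) [] 0
    (fun c hc g' => innerA_nonpos m _ adjacent c ha
      ((PySem.List.mem_pyRange_one.1 hc).2) _ g' hne
      (fun x hx => (PySem.List.mem_pyRange_one.1 hx).2))
  rw [List.append_nil] at hrun
  rw [hrun, fold_max_one _ _ hne]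
  simp [pvOuterA]

lemma A_big (m : List (List Int)) (adjacent : Int) (hn : 1 ≤ m.length)
    (ha : (m.length : Int) < adjacent) : greatest_product_of_diag m adjacent = 0 := by
  unfold greatest_product_of_diag
  have hn' : (0 : Int) < (m.length : Int) := by exact_mod_cast hn
  have hrun := outerA_run m (m.length : Int) adjacent (fun _ g => g)
    (PySem.List.pyRange 0 (m.length : Int) 1) [] 0
    (fun c hc g' => by
      rw [PySem.List.pyRange_one_cons hn']
      exact innerA_stop m _ adjacent c _ g' (Or.inr ⟨0, _, rfl, by omega⟩))
  rw [List.append_nil] at hrun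
  rw [hrun]
  simp [pvOuterA, List.foldl_fixed]

-- A on the main case: the double fold of max over all window positions
lemma A_main (m : List (List Int)) (kk : Nat) (h1 : 1 ≤ kk) (h2 : kk ≤ m.length) :
    greatest_product_of_diag m (kk : Int)
      = (List.range (m.length - kk + 1)).foldl
          (fun g c => (List.range (m.length - kk + 1)).foldl
            (fun g u => max g (pvWP m kk c u)) g) 0 := by
  show pvOuterA m (m.length : Int) (kk : Int) (PySem.List.pyRange 0 (m.length : Int) 1) 0 = _
  set n : Int := (m.length : Int) with hn
  set M1 : Nat := m.length - kk + 1 with hM1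
  have hmm : ((M1 : Nat) : Int) = n - kk + 1 := by rw [hM1, hn]; omega
  have hsplit : PySem.List.pyRange 0 n 1
      = PySem.List.pyRange 0 (M1 : Int) 1 ++ PySem.List.pyRange (M1 : Int) n 1 :=
    PySem.List.pyRange_one_append 0 (M1 : Int) n (by omega) (by omega)
  have hfit : ∀ x ∈ PySem.List.pyRange 0 (M1 : Int) 1, x + (kk : Int) ≤ n := by
    intro x hx
    have := PySem.List.mem_pyRange_one.1 hx
    omega
  have hinner : ∀ c ∈ PySem.List.pyRange 0 (M1 : Int) 1, ∀ g : Int,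
      pvInnerA m n (kk : Int) c (PySem.List.pyRange 0 n 1) g
        = .inr ((PySem.List.pyRange 0 (M1 : Int) 1).foldl
            (fun g num => max g (pvProdA m (kk : Int) c num)) g) := by
    intro c hc g
    have hcb := PySem.List.mem_pyRange_one.1 hc
    rw [hsplit, innerA_run m n (kk : Int) c _ _ g (by omega) hfit]
    rcases eq_or_lt_of_le (show (M1 : Int) ≤ n by omega) with he | hlt
    · exact innerA_stop _ _ _ _ _ _ (Or.inl (by rw [← he]; exact PySem.List.pyRange_one_eq_nil le_rfl))
    · rw [PySem.List.pyRange_one_cons hlt]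
      exact innerA_stop _ _ _ _ _ _ (Or.inr ⟨_, _, rfl, by omega⟩)
  rw [hsplit, outerA_run m n (kk : Int) _ _ _ 0 hinner]
  -- the remaining cols (if any) hit the early return
  have hrest : pvOuterA m n (kk : Int) (PySem.List.pyRange (M1 : Int) n 1)
      ((PySem.List.pyRange 0 (M1 : Int) 1).foldl
        (fun g c => (PySem.List.pyRange 0 (M1 : Int) 1).foldl
          (fun g num => max g (pvProdA m (kk : Int) c num)) g) 0)
      = (PySem.List.pyRange 0 (M1 : Int) 1).foldl
          (fun g c => (PySem.List.pyRange 0 (M1 : Int) 1).foldl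
            (fun g num => max g (pvProdA m (kk : Int) c num)) g) 0 := by
    rcases eq_or_lt_of_le (show (M1 : Int) ≤ n by omega) with he | hlt
    · rw [← he, PySem.List.pyRange_one_eq_nil le_rfl]; rfl
    · rw [PySem.List.pyRange_one_cons hlt]
      apply outerA_ret
      rw [PySem.List.pyRange_one_cons (show (0 : Int) < n by omega)]
      exact innerA_ret _ _ _ _ _ _ _ (by omega) (by omega)
  rw [hrest]
  rw [PySem.List.pyRange_zero_natCast M1, List.foldl_map]
  congr 1
  funext g c
  rw [List.foldl_map]
  congr 1
  funext g' u
  rw [prodA_eq]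

-- row/column offsets of the diagonal with (Int) shift σ - M
def pvAOff (M σ : Nat) : Nat := M - min σ M
def pvBOff (M σ : Nat) : Nat := σ - min σ M

-- B's diagonal as a comprehension over Nat indices
lemma diag_eq (m : List (List Int)) (kk σ : Nat) (h1 : 1 ≤ kk) (h2 : kk ≤ m.length)
    (hσ : σ ≤ 2 * (m.length - kk)) :
    pvDiag m (m.length : Int) ((σ : Int) - ((m.length - kk : Nat) : Int))
      = (List.range (m.length - pvAOff (m.length - kk) σ - pvBOff (m.length - kk) σ)).map
          (fun i => pvEnt m (i + pvAOff (m.length - kk) σ) (i + pvBOff (m.length - kk) σ)) := by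
  set M : Nat := m.length - kk with hM
  set a : Nat := pvAOff M σ with ha
  set b : Nat := pvBOff M σ with hb
  have ha' : (a : Int) = M - min σ M := by rw [ha]; unfold pvAOff; omega
  have hb' : (b : Int) = σ - min σ M := by rw [hb]; unfold pvBOff; omega
  have hab : a + b ≤ M := by rw [ha, hb]; unfold pvAOff pvBOff; omega
  unfold pvDiag
  have e1 : max 0 (-((σ : Int) - (M : Int))) = (a : Int) := by omega
  have e2 : (m.length : Int) - max 0 ((σ : Int) - (M : Int)) = ((m.length - b : Nat) : Int) := by
    omega
  rw [e1, e2, PySem.List.pyRange_one]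
  have e3 : (((m.length - b : Nat) : Int) - (a : Int)).toNat = m.length - a - b := by omega
  rw [e3]
  rw [List.map_map]
  apply List.map_congr_left
  intro t ht
  simp only [Function.comp_apply]
  have e4 : (a : Int) + (t : Int) = ((t + a : Nat) : Int) := by omega
  have e5 : ((t + a : Nat) : Int) + ((σ : Int) - (M : Int)) = ((t + b : Nat) : Int) := by omega
  rw [e4, e5]
  simp only [PySem.List.pyGetD_natCast, pvEnt]

-- B on the main case: fold of max over every diagonal window
lemma B_main (m : List (List Int)) (kk : Nat) (_hn : 1 ≤ m.length) (h1 : 1 ≤ kk)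
    (h2 : kk ≤ m.length) :
    greatest_product_of_diag_alt m (kk : Int)
      = (List.range (2 * (m.length - kk) + 1)).foldl
          (fun best σ => (List.range (m.length - kk + 1 - pvAOff (m.length - kk) σ
              - pvBOff (m.length - kk) σ)).foldl
            (fun b j => max b (pvWP m kk (j + pvAOff (m.length - kk) σ)
              (j + pvBOff (m.length - kk) σ))) best) 0 := by
  set M : Nat := m.length - kk with hM
  have hc1 : ¬ ((kk : Int) ≤ 0) := by omega
  have hc2 : ¬ ((m.length : Int) < (kk : Int)) := by omega
  show (if (kk : Int) ≤ 0 then _ else if (m.length : Int) < (kk : Int) then _ else _) = _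
  rw [if_neg hc1, if_neg hc2]
  have hr : PySem.List.pyRange (-((m.length : Int) - (kk : Int))) ((m.length : Int) - (kk : Int) + 1) 1
      = (List.range (2 * M + 1)).map (fun σ : Nat => ((σ : Int) - (M : Int))) := by
    rw [PySem.List.pyRange_one]
    have e1 : (((m.length : Int) - (kk : Int) + 1) - (-((m.length : Int) - (kk : Int)))).toNat
        = 2 * M + 1 := by omega
    rw [e1]
    apply List.map_congr_left
    intro t ht
    omega
  rw [hr, List.foldl_map]
  apply PySem.List.foldl_congr_mem
  intro best σ hσ
  have hσ' : σ ≤ 2 * M := by simpa using Nat.lt_succ_iff.1 (List.mem_range.1 hσ)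
  set a : Nat := pvAOff M σ with ha
  set b : Nat := pvBOff M σ with hb
  have hab : a + b ≤ M := by rw [ha, hb]; unfold pvAOff pvBOff; omega
  rw [diag_eq m kk σ h1 h2 hσ']
  set L' : Nat := m.length - a - b with hL'
  set g : Nat → Int := fun i => pvEnt m (i + a) (i + b) with hg
  have hkL : kk ≤ L' := by omega
  rw [mwp_eq _ kk (by simpa using hkL)]
  -- identify the windows with pvWP values
  have hw : ∀ j, j + kk ≤ L' →
      ((((List.range L').map g).drop j).take kk).prod = pvWP m kk (j + a) (j + b) := by
    intro j hj
    rw [window_of_map_range g L' j kk hj]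
    unfold pvWP
    congr 1
    apply List.map_congr_left
    intro t ht
    rw [hg]
    simp only []
    congr 1 <;> omega
  have hw0 : (((List.range L').map g).take kk).prod = pvWP m kk a b := by
    have := hw 0 (by omega)
    simpa using this
  have hlen : ((List.range L').map g).length = L' := by simp
  rw [hlen, hw0]
  have hrest : (List.range (L' - kk)).map
        (fun j => ((((List.range L').map g).drop (j + 1)).take kk).prod)
      = (List.range (L' - kk)).map (fun j => pvWP m kk ((j + 1) + a) ((j + 1) + b)) := by
    apply List.map_congr_left
    intro j hj
    exact hw (j + 1) (by have := List.mem_range.1 hj; omega)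
  rw [hrest]
  -- fold the per-diagonal max into the accumulator
  have hcnt : M + 1 - a - b = (L' - kk) + 1 := by omega
  rw [hcnt, List.range_succ_eq_map, List.foldl_cons, List.foldl_map]
  simp only [Nat.zero_add]
  rw [foldl_maxf_comm (fun j => pvWP m kk (j + 1 + a) (j + 1 + b))]
  rw [List.foldl_map]

-- the window positions (col, num), enumerated row-major (A) and diagonal-major (B), coincide
lemma perm_pairs (M : Nat) :
    ((List.range (M + 1)).flatMap (fun c => (List.range (M + 1)).map (fun u => (c, u)))).Perm
      ((List.range (2 * M + 1)).flatMap (fun σ =>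
        (List.range (M + 1 - pvAOff M σ - pvBOff M σ)).map
          (fun j => (j + pvAOff M σ, j + pvBOff M σ)))) := by
  apply List.perm_of_nodup_nodup_toFinset_eq
  · refine List.nodup_flatMap.2 ⟨?_, ?_⟩
    · intro c _
      refine (List.nodup_range).map ?_
      intro u u' h
      rw [Prod.mk.injEq] at h
      exact h.2
    · refine List.Pairwise.imp ?_ (List.pairwise_lt_range)
      intro c c' hlt p hp hp'
      simp only [List.mem_map] at hp hp'
      obtain ⟨u, _, rfl⟩ := hp
      obtain ⟨u', _, h⟩ := hp'
      rw [Prod.mk.injEq] at h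
      omega
  · refine List.nodup_flatMap.2 ⟨?_, ?_⟩
    · intro σ _
      refine (List.nodup_range).map ?_
      intro j j' h
      rw [Prod.mk.injEq] at h
      omega
    · refine List.Pairwise.imp ?_ (List.pairwise_lt_range)
      intro σ σ' hlt p hp hp'
      simp only [List.mem_map] at hp hp'
      obtain ⟨j, _, rfl⟩ := hp
      obtain ⟨j', _, h⟩ := hp'
      rw [Prod.mk.injEq] at h
      unfold pvAOff pvBOff at h
      omega
  · ext p
    obtain ⟨c, u⟩ := p
    simp only [List.mem_toFinset, List.mem_flatMap, List.mem_map, List.mem_range,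
      Prod.mk.injEq]
    constructor
    · rintro ⟨c', hc', u', hu', rfl, rfl⟩
      refine ⟨M + u' - c', by omega, min c' u', ?_⟩
      unfold pvAOff pvBOff
      omega
    · rintro ⟨σ, hσ, j, hj, rfl, rfl⟩
      unfold pvAOff pvBOff at hj ⊢
      refine ⟨j + pvAOff M σ, ?_, j + pvBOff M σ, ?_, rfl, rfl⟩ <;>
        (simp only [pvAOff, pvBOff]; omega)

lemma B_nonpos (m : List (List Int)) (adjacent : Int) (hn : 1 ≤ m.length)
    (ha : adjacent ≤ 0) : greatest_product_of_diag_alt m adjacent = 1 := by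
  show (if adjacent ≤ 0 then (if (m.length : Int) > 0 then 1 else 0) else _) = 1
  rw [if_pos ha, if_pos (by exact_mod_cast hn)]

lemma B_big (m : List (List Int)) (adjacent : Int) (ha : (m.length : Int) < adjacent) :
    greatest_product_of_diag_alt m adjacent = 0 := by
  show (if adjacent ≤ 0 then _ else if (m.length : Int) < adjacent then 0 else _) = 0
  rw [if_neg (by omega), if_pos ha]

-- the two double folds of max agree: same multiset of window products
lemma folds_eq (m : List (List Int)) (kk : Nat) :
    (List.range ((m.length - kk) + 1)).foldl
        (fun g c => (List.range ((m.length - kk) + 1)).foldl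
          (fun g u => max g (pvWP m kk c u)) g) 0
      = (List.range (2 * (m.length - kk) + 1)).foldl
          (fun best σ => (List.range ((m.length - kk) + 1 - pvAOff (m.length - kk) σ
              - pvBOff (m.length - kk) σ)).foldl
            (fun b j => max b (pvWP m kk (j + pvAOff (m.length - kk) σ)
              (j + pvBOff (m.length - kk) σ))) best) 0 := by
  have heq := ((perm_pairs (m.length - kk)).map
    (fun p : Nat × Nat => pvWP m kk p.1 p.2)).foldl_op_eq (a := (0 : Int)) (op := max)
  simp only [List.map_flatMap, List.foldl_flatMap, List.map_map, Function.comp,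
    List.foldl_map] at heq
  exact heq

-- ===== VERDICT (by name: the statement is the Claim_ definition above) =====
theorem greatest_product_of_diag_spec : Claim_equal_greatest_product_of_diag := by
  unfold Claim_equal_greatest_product_of_diag
  intro matrix adjacent _ _
  unfold Spec_greatest_product_of_diag
  rcases Nat.eq_zero_or_pos matrix.length with h0 | hpos
  · rw [A_empty _ _ h0, B_empty _ _ h0]
  · by_cases hneg : adjacent ≤ 0
    · rw [A_nonpos _ _ hpos hneg, B_nonpos _ _ hpos hneg]
    · by_cases hbig : (matrix.length : Int) < adjacent
      · rw [A_big _ _ hpos hbig, B_big _ _ hbig]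
      · obtain ⟨kk, rfl⟩ : ∃ kk : Nat, adjacent = (kk : Int) :=
          ⟨adjacent.toNat, (Int.toNat_of_nonneg (by omega)).symm⟩
        rw [A_main matrix kk (by omega) (by omega),
          B_main matrix kk hpos (by omega) (by omega)]
        exact folds_eq matrix kk
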